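-- pv_equiv track=rewrite | github.com/mediatechnologycenter/SPIDer | src/mds_pid.py | get_docs_sentence_indices
-- ===== SOURCE A (Python) =====
-- def get_docs_sentence_indices(sample):
--     doc_sentences_indices = []
--     q = 0
--     for d in sample["cond_probs"][0]:
--         doc_sentences_indices.append([])
--         for _ in d:
--             doc_sentences_indices[-1].append(q)
--             q += 1
--     return doc_sentences_indices
-- ===== SOURCE B (Python) =====
-- def get_docs_sentence_indices(sample):
--     docs = sample["cond_probs"][0]
--     lens = [len(d) for d in docs]
--     flat = list(range(sum(lens)))
--     return [flat[sum(lens[:i]):sum(lens[:i + 1])] for i in range(len(docs))]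
-- ===== Notes on version B (the rewrite author's own statement) =====
-- stated objective: alternative
-- what changed: Replaces the counter threaded through two nested loops by staged passes: compute per-document lengths, materialise one global flat index list range(sum(lens)), and cut it into per-document chunks by slicing at prefix-sum offsets.
import Mathlib
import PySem

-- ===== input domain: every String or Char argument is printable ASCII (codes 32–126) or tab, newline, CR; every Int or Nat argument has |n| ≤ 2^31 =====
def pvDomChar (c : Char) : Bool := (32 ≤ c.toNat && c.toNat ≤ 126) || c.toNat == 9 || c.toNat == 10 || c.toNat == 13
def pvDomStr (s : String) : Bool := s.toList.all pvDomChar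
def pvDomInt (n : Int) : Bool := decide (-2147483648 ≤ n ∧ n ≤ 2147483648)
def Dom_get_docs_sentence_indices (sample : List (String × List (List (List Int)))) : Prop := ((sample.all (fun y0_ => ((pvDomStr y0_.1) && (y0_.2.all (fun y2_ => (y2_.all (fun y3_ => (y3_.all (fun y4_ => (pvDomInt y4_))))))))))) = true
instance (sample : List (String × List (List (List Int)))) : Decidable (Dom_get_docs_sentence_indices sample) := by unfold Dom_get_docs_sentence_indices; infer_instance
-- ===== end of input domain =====

-- B replaces the counter threaded through the nested loops by staged passes: per-document
-- lengths, one global flat index list range(sum(lens)), cut into chunks by slicing at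
-- prefix-sum offsets (alternative decomposition, same result).

-- ===== PORT A =====
-- A's nested loops: outer state = (finished doc lists, counter q); the inner loop appends q
-- to the current document's list ('doc_sentences_indices[-1].append(q)') and increments q.
def get_docs_sentence_indices (sample : List (String × List (List (List Int)))) : List (List Int) :=
  match sample.lookup "cond_probs" with
  | none => []        -- KeyError: excluded by Pre_
  | some cp =>
    match PySem.List.pyGet? cp 0 with
    | none => []      -- IndexError: excluded by Pre_
    | some docs =>
      (docs.foldl
        (fun (st : List (List Int) × Int) d =>
          let inner := d.foldl (fun (st2 : List Int × Int) _ => (st2.1 ++ [st2.2], st2.2 + 1)) ([], st.2)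
          (st.1 ++ [inner.1], inner.2))
        ([], 0)).1

-- ===== PORT B =====
-- Source B line by line: lens = [len(d) for d in docs]; flat = list(range(sum(lens)));
-- [flat[sum(lens[:i]):sum(lens[:i+1])] for i in range(len(docs))].
def get_docs_sentence_indices_alt (sample : List (String × List (List (List Int)))) : List (List Int) :=
  match sample.lookup "cond_probs" with
  | none => []        -- KeyError: excluded by Pre_
  | some cp =>
    match PySem.List.pyGet? cp 0 with
    | none => []      -- IndexError: excluded by Pre_
    | some docs =>
      let lens : List Int := docs.map (fun d => (d.length : Int))
      let flat : List Int := PySem.List.pyRange 0 lens.sum 1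
      (PySem.List.pyRange 0 (docs.length : Int) 1).map
        (fun i =>
          PySem.List.slice flat
            (some (PySem.List.slice lens none (some i)).sum)
            (some (PySem.List.slice lens none (some (i + 1))).sum))

-- ===== PRECONDITION & SPEC =====
-- Pre_: the dict has key "cond_probs" with a nonempty list value (otherwise A raises
-- KeyError / IndexError).
def Pre_get_docs_sentence_indices (sample : List (String × List (List (List Int)))) : Prop :=
  (sample.lookup "cond_probs").getD [] ≠ []
instance (sample : List (String × List (List (List Int)))) : Decidable (Pre_get_docs_sentence_indices sample) := by unfold Pre_get_docs_sentence_indices; infer_instance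

def pvWitness_get_docs_sentence_indices : (List (String × List (List (List Int)))) :=
  [("cond_probs", [[[1, 2], [3]]])]

def Spec_get_docs_sentence_indices (sample : List (String × List (List (List Int)))) (out : List (List Int)) : Prop := out = get_docs_sentence_indices_alt sample
instance (sample : List (String × List (List (List Int)))) (out : List (List Int)) : Decidable (Spec_get_docs_sentence_indices sample out) := by unfold Spec_get_docs_sentence_indices; infer_instance

-- ===== CLAIM (what is proved, stated in full; the proofs are below) =====
def Claim_equal_get_docs_sentence_indices : Prop := ∀ (sample : List (String × List (List (List Int)))), Dom_get_docs_sentence_indices sample → Pre_get_docs_sentence_indices sample → Spec_get_docs_sentence_indices sample (get_docs_sentence_indices sample)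

-- ===== LEMMAS AND PROOFS =====

-- Reference shape both programs reach: consecutive ranges, one per document.
def pvRef (docs : List (List Int)) (q : Int) : List (List Int) :=
  match docs with
  | [] => []
  | d :: ds => PySem.List.pyRange q (q + d.length) 1 :: pvRef ds (q + (d.length : Int))

-- A's inner loop over a document builds exactly range(q, q+len d) appended to the accumulator.
theorem inner_loop_eq {α : Type} (d : List α) (c : List Int) (q : Int) :
    d.foldl (fun (st2 : List Int × Int) _ => (st2.1 ++ [st2.2], st2.2 + 1)) (c, q)
      = (c ++ PySem.List.pyRange q (q + d.length) 1, q + d.length) := by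
  induction d generalizing c q with
  | nil => simp [PySem.List.pyRange_one_eq_nil (le_refl q)]
  | cons x xs ih =>
    simp only [List.foldl_cons, ih]
    have hcons : PySem.List.pyRange q (q + (((x :: xs).length : Int))) 1
        = q :: PySem.List.pyRange (q + 1) (q + 1 + (xs.length : Int)) 1 := by
      rw [PySem.List.pyRange_one_cons (by simp only [List.length_cons]; push_cast; omega)]
      congr 2
      simp only [List.length_cons]; push_cast; ring
    rw [hcons]
    simp only [List.append_assoc, List.singleton_append, Prod.mk.injEq, List.length_cons, true_and]
    push_cast
    ring

-- A's outer fold produces the reference list of consecutive ranges.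
theorem a_fold_eq_ref (docs : List (List Int)) (acc : List (List Int)) (q : Int) :
    (docs.foldl
        (fun (st : List (List Int) × Int) d =>
          let inner := d.foldl (fun (st2 : List Int × Int) _ => (st2.1 ++ [st2.2], st2.2 + 1)) ([], st.2)
          (st.1 ++ [inner.1], inner.2))
        (acc, q)).1
      = acc ++ pvRef docs q := by
  induction docs generalizing acc q with
  | nil => simp [pvRef]
  | cons d ds ih =>
    rw [List.foldl_cons]
    rw [show (let inner := d.foldl (fun (st2 : List Int × Int) _ => (st2.1 ++ [st2.2], st2.2 + 1)) ([], (acc, q).2)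
              ((acc, q).1 ++ [inner.1], inner.2))
          = (acc ++ [PySem.List.pyRange q (q + d.length) 1], q + (d.length : Int)) from by
        simp [inner_loop_eq]]
    rw [ih]
    simp [pvRef]

-- Slicing the global flat range at in-bounds offsets yields the corresponding subrange.
theorem slice_pyRange_zero (n a b : Int) (h0 : 0 ≤ a) (hab : a ≤ b) (hbn : b ≤ n) :
    PySem.List.slice (PySem.List.pyRange 0 n 1) (some a) (some b)
      = PySem.List.pyRange a b 1 := by
  rw [PySem.List.slice_toNat _ h0 (le_trans h0 hab)]
  rw [PySem.List.pyRange_one_append 0 a n h0 (le_trans hab hbn)]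
  have hlen1 : (PySem.List.pyRange 0 a 1).length = a.toNat := by
    rw [PySem.List.length_pyRange_one]; omega
  rw [← hlen1, List.drop_left, hlen1]
  rw [PySem.List.pyRange_one_append a b n hab hbn]
  have hlen2 : (PySem.List.pyRange a b 1).length = b.toNat - a.toNat := by
    rw [PySem.List.length_pyRange_one]; omega
  rw [← hlen2, List.take_left]

-- Prefix sums of the cast lengths are casts of Nat prefix sums.
theorem take_lens_sum (docs : List (List Int)) (k : Nat) :
    ((docs.map (fun d => (d.length : Int))).take k).sum
      = (((docs.map List.length).take k).sum : Int) := by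
  rw [← List.map_take, ← List.map_take]
  induction (docs.take k) with
  | nil => simp
  | cons d ds ih => simp [ih]

-- The total of the cast lengths is the cast of the Nat total.
theorem lens_sum_cast (docs : List (List Int)) :
    (docs.map (fun d => (d.length : Int))).sum = (((docs.map List.length).sum : Nat) : Int) := by
  induction docs with
  | nil => simp
  | cons d ds ih => simp [ih]

-- Nat prefix sums are monotone and bounded by the total.
theorem nat_prefix_le (l : List Nat) (k : Nat) : (l.take k).sum ≤ l.sum :=
  (List.take_sublist k l).sum_le_sum (fun a _ => Nat.zero_le a)

theorem nat_prefix_succ (l : List Nat) (k : Nat) : (l.take k).sum ≤ (l.take (k + 1)).sum := by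
  have h : (l.take (k + 1)).take k = l.take k := by rw [List.take_take]; congr 1; omega
  rw [← h]
  exact ((l.take (k + 1)).take_sublist k).sum_le_sum (fun a _ => Nat.zero_le a)

-- B's comprehension over range(len docs) equals the reference list, shifted by any offset q.
theorem b_map_eq_ref (docs : List (List Int)) (q : Int) :
    (List.range docs.length).map
        (fun k => PySem.List.pyRange
          (q + ((docs.map (fun d => (d.length : Int))).take k).sum)
          (q + ((docs.map (fun d => (d.length : Int))).take (k + 1)).sum) 1)
      = pvRef docs q := by
  induction docs generalizing q with
  | nil => simp [pvRef]
  | cons d ds ih =>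
    simp only [List.length_cons, List.range_succ_eq_map, List.map_cons, List.map_map, pvRef]
    congr 1
    · simp [List.take_succ_cons]
    · rw [← ih (q + d.length)]
      apply List.map_congr_left
      intro k _
      simp only [Function.comp_apply, Nat.succ_eq_add_one,
        List.take_succ_cons, List.sum_cons]
      ring_nf

-- ===== VERDICT (by name: the statement is the Claim_ definition above) =====
theorem get_docs_sentence_indices_spec : Claim_equal_get_docs_sentence_indices := by
  intro sample _ _
  unfold Spec_get_docs_sentence_indices get_docs_sentence_indices get_docs_sentence_indices_alt
  cases h : sample.lookup "cond_probs" with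
  | none => rfl
  | some cp =>
    cases hg : PySem.List.pyGet? cp 0 with
    | none => simp only [hg]
    | some docs =>
      simp only [hg]
      rw [a_fold_eq_ref docs [] 0, List.nil_append, ← b_map_eq_ref docs 0]
      rw [PySem.List.pyRange_zero_nat, List.map_map]
      apply List.map_congr_left
      intro k hk
      simp only [Function.comp_apply, zero_add]
      symm
      rw [PySem.List.slice_to_natCast,
          show ((k : Int) + 1) = (((k + 1 : Nat)) : Int) by push_cast; ring,
          PySem.List.slice_to_natCast]
      exact slice_pyRange_zero _ _ _
        (by rw [take_lens_sum]; positivity)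
        (by rw [take_lens_sum, take_lens_sum]
            exact_mod_cast nat_prefix_succ (docs.map List.length) k)
        (by rw [take_lens_sum, lens_sum_cast]
            exact_mod_cast nat_prefix_le (docs.map List.length) (k + 1))
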